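-- pv_equiv track=rewrite | github.com/nrichards/mdpicgen | util.py | find_nearest_less_than_or_equal
-- ===== SOURCE A (Python) =====
-- def find_nearest_less_than_or_equal(list_of_tuples: [(int, str)], search_value):
--     """Finds the nearest less-than-or-equal number from a list of tuples.
--
--     Args:
--         list_of_tuples: A list of tuples where the first element is an integer.
--         search_value: The integer to search for.
--
--     Returns:
--         A tuple containing the nearest less-than-or-equal number and its corresponding data,
--          or None if no such number exists.
--     """
--     closest_value = None
--     closest_data = None
--
--     for num, _ in list_of_tuples:
--         if num <= search_value:
--             # Update if closer or the first match
--             if closest_value is None or num >= closest_value: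
--                 closest_value = num
--                 closest_data = _
--
--     return closest_value, closest_data
-- ===== SOURCE B (Python) =====
-- def find_nearest_less_than_or_equal(list_of_tuples, search_value):
--     # Phase 1: collect qualifying candidates with their positions.
--     candidates = [(i, num, data)
--                   for i, (num, data) in enumerate(list_of_tuples)
--                   if num <= search_value]
--     # Phase 2: single max reduction; index as secondary key makes the
--     # last occurrence of the maximal number win.
--     best = max(candidates, key=lambda t: (t[1], t[0]), default=None)
--     if best is None:
--         return (None, None)
--     return (best[1], best[2])
-- ===== Notes on version B (the rewrite author's own statement) =====
-- stated objective: idiomatic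
-- what changed: Replaces the hand-written running-best loop with a two-phase filter (comprehension collecting position-tagged candidates) plus a single max() reduction keyed on (value, index).
import Mathlib
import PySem

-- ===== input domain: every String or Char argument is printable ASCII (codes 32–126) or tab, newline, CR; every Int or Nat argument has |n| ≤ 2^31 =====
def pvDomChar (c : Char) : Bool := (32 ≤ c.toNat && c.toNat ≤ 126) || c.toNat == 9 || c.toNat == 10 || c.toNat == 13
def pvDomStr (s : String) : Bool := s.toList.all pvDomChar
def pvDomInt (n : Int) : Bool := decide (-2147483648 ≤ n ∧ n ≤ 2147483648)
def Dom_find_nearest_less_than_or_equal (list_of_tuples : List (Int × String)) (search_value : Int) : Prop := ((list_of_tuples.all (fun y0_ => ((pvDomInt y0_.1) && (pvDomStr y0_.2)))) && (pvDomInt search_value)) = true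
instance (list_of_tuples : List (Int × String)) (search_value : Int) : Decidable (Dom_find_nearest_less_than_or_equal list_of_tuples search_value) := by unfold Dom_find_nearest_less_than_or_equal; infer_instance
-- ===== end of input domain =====

-- B replaces A's running-best loop by a filter-candidates-then-max() reduction keyed on
-- (value, index); objective: idiomatic (same value on every input, no speed claim).

-- ===== PORT A =====
def find_nearest_less_than_or_equal (list_of_tuples : List (Int × String)) (search_value : Int) : Option Int × Option String :=
  -- closest_value, closest_data carried as the pair acc; 'num >= closest_value' is acc-value ≤ num
  List.foldl
    (fun (acc : Option Int × Option String) (p : Int × String) =>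
      if p.1 ≤ search_value then
        match acc.1 with
        | none => (some p.1, some p.2)
        | some v => if v ≤ p.1 then (some p.1, some p.2) else acc
      else acc)
    (none, none) list_of_tuples

-- ===== PORT B =====
def find_nearest_less_than_or_equal_alt (list_of_tuples : List (Int × String)) (search_value : Int) : Option Int × Option String :=
  let candidates :=
    ((PySem.List.enumerate list_of_tuples).filter (fun p => decide (p.2.1 ≤ search_value))).map
      (fun p => (p.1, p.2.1, p.2.2))
  -- max(candidates, key=lambda t: (t[1], t[0]), default=None)
  match PySem.List.max2? candidates (fun t => t.2.1) (fun t => t.1) with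
  | none => (none, none)
  | some b => (some b.2.1, some b.2.2)

-- ===== PRECONDITION & SPEC =====
def Spec_find_nearest_less_than_or_equal (list_of_tuples : List (Int × String)) (search_value : Int) (out : Option Int × Option String) : Prop := out = find_nearest_less_than_or_equal_alt list_of_tuples search_value
instance (list_of_tuples : List (Int × String)) (search_value : Int) (out : Option Int × Option String) : Decidable (Spec_find_nearest_less_than_or_equal list_of_tuples search_value out) := by unfold Spec_find_nearest_less_than_or_equal; infer_instance

-- ===== CLAIM (what is proved, stated in full; the proofs are below) =====
def Claim_equal_find_nearest_less_than_or_equal : Prop := ∀ (list_of_tuples : List (Int × String)) (search_value : Int), Dom_find_nearest_less_than_or_equal list_of_tuples search_value → Spec_find_nearest_less_than_or_equal list_of_tuples search_value (find_nearest_less_than_or_equal list_of_tuples search_value)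

-- ===== LEMMAS AND PROOFS =====

-- the step function of max2? with keys (fun t => t.2.1) (fun t => t.1), named for the proofs
def pvStepB (a : Option (Int × Int × String)) (x : Int × Int × String) : Option (Int × Int × String) :=
  match a with
  | none => some x
  | some m =>
    if (decide (m.2.1 < x.2.1) || !decide (x.2.1 < m.2.1) && decide (m.1 < x.1)) = true
    then some x else some m

theorem pvStepB_some_pos (m x : Int × Int × String) (h : m.2.1 ≤ x.2.1) (h2 : m.1 < x.1) :
    pvStepB (some m) x = some x := by
  rcases lt_or_eq_of_le h with h | h
  · simp [pvStepB, h]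
  · simp [pvStepB, h, h2]

theorem pvStepB_some_neg (m x : Int × Int × String) (h : x.2.1 < m.2.1) :
    pvStepB (some m) x = some m := by
  simp [pvStepB, h, asymm h]

-- render the max2?-fold state (index, value, data) as A's (closest_value, closest_data) pair
def pvRender : Option (Int × Int × String) → Option Int × Option String
  | none => (none, none)
  | some b => (some b.2.1, some b.2.2)

-- invariant: any stored candidate's index is below the next enumerate index
def pvWf (acc : Option (Int × Int × String)) (s : Int) : Prop :=
  ∀ b, acc = some b → b.1 < s

theorem pvLoop (search_value : Int) (l : List (Int × String)) :
    ∀ (s : Int) (acc : Option (Int × Int × String)), pvWf acc s →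
    l.foldl
      (fun (a : Option Int × Option String) (p : Int × String) =>
        if p.1 ≤ search_value then
          match a.1 with
          | none => (some p.1, some p.2)
          | some v => if v ≤ p.1 then (some p.1, some p.2) else a
        else a)
      (pvRender acc)
    = pvRender
        ((((PySem.List.enumerate l s).filter (fun p => decide (p.2.1 ≤ search_value))).map
            (fun p => (p.1, p.2.1, p.2.2))).foldl pvStepB acc) := by
  induction l with
  | nil => intro s acc _; simp [PySem.List.enumerate]
  | cons x t ih =>
    intro s acc hwf
    rw [PySem.List.enumerate_cons]
    by_cases hle : x.1 ≤ search_value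
    · simp only [List.foldl_cons, List.filter_cons, decide_eq_true_eq, hle, if_pos, List.map_cons]
      cases acc with
      | none =>
        have hs : pvStepB none (s, x.1, x.2) = some (s, x.1, x.2) := rfl
        rw [hs]
        simpa [pvRender, hle] using ih (s + 1) (some (s, x.1, x.2)) (by intro b hb; cases hb; omega)
      | some m =>
        have hm : m.1 < s := hwf m rfl
        by_cases hv : m.2.1 ≤ x.1
        · rw [pvStepB_some_pos m (s, x.1, x.2) hv hm]
          simpa [pvRender, hle, hv] using ih (s + 1) (some (s, x.1, x.2)) (by intro b hb; cases hb; omega)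
        · rw [pvStepB_some_neg m (s, x.1, x.2) (lt_of_not_ge hv)]
          simpa [pvRender, hle, hv] using ih (s + 1) (some m) (by intro b hb; cases hb; omega)
    · simp only [List.foldl_cons, List.filter_cons, decide_eq_true_eq, hle]
      cases acc with
      | none =>
        simpa [pvRender, hle] using ih (s + 1) none (by intro b hb; cases hb)
      | some m =>
        have hm : m.1 < s := hwf m rfl
        simpa [pvRender, hle] using ih (s + 1) (some m) (by intro b hb; cases hb; omega)

-- ===== VERDICT (by name: the statement is the Claim_ definition above) =====
theorem find_nearest_less_than_or_equal_spec : Claim_equal_find_nearest_less_than_or_equal := by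
  intro l sv _
  unfold Spec_find_nearest_less_than_or_equal
  unfold find_nearest_less_than_or_equal find_nearest_less_than_or_equal_alt
  have hmax : PySem.List.max2?
      (((PySem.List.enumerate l 0).filter (fun p => decide (p.2.1 ≤ sv))).map
        (fun p => (p.1, p.2.1, p.2.2)))
      (fun t => t.2.1) (fun t => t.1)
      = (((PySem.List.enumerate l 0).filter (fun p => decide (p.2.1 ≤ sv))).map
        (fun p => (p.1, p.2.1, p.2.2))).foldl pvStepB none := by
    unfold PySem.List.max2?
    congr 1
    funext a x
    cases a <;> rfl
  have h := pvLoop sv l 0 none (by intro b hb; cases hb)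
  simp only [pvRender] at h
  simp only [hmax, h]
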